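-- pv_equiv track=rewrite | github.com/DanBeverley/Story-Generating | text_processing.py | text_cleaning
-- ===== SOURCE A (Python) =====
-- def text_cleaning(story):
--     for p in '!,.:;?':
--         story = story.replace(' ' + p, p)
--     story = story.replace(' ' + "n't", "n't")
--     story = story.replace(' ' + "'s", "'s")
--     story = story.replace(' ' + "'re", "'re")
--     story = story.replace(' ' + "'ve", "'ve")
--     story = story.replace(' ' + "'ll", "'ll")
--     story = story.replace(' ' + "'am", "'am")
--     story = story.replace(' ' + "'m", "'m")
--     return story
-- ===== SOURCE B (Python) =====
-- def text_cleaning(story):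
--     # One left-to-right pass: drop a space exactly when the rest of the string
--     # starts with a punctuation mark or a contraction suffix.
--     targets = ('!', ',', '.', ':', ';', '?', "n't", "'s", "'re", "'ve", "'ll", "'am", "'m")
--     out = []
--     for i, ch in enumerate(story):
--         if ch == ' ' and story.startswith(targets, i + 1):
--             continue
--         out.append(ch)
--     return ''.join(out)
-- ===== Notes on version B (the rewrite author's own statement) =====
-- stated objective: alternative
-- what changed: Replaces the cascade of 13 sequential str.replace passes over the whole string by a single left-to-right scan that drops a space exactly when the remainder starts with one of the punctuation/contraction targets.
import Mathlib
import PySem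

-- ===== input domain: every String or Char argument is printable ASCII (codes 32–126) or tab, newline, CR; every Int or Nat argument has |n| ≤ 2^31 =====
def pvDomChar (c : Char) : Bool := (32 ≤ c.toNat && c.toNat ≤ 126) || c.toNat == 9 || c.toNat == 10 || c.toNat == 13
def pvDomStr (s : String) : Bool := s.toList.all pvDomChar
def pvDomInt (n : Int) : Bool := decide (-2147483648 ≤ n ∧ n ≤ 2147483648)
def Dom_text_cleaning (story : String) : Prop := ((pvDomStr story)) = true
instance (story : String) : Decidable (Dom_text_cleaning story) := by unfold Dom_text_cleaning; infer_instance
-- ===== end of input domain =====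

-- B replaces A's cascade of 13 sequential str.replace passes by one left-to-right scan
-- that drops a space exactly when the remainder starts with a punctuation/contraction target.

-- ===== PORT A =====
def text_cleaning (story : String) : String :=
  let story := "!,.:;?".toList.foldl
    (fun s p => PySem.Str.replace s (String.ofList [' ', p]) (String.ofList [p])) story
  let story := PySem.Str.replace story " n't" "n't"
  let story := PySem.Str.replace story " 's" "'s"
  let story := PySem.Str.replace story " 're" "'re"
  let story := PySem.Str.replace story " 've" "'ve"
  let story := PySem.Str.replace story " 'll" "'ll"
  let story := PySem.Str.replace story " 'am" "'am"
  let story := PySem.Str.replace story " 'm" "'m"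
  story

-- ===== PORT B =====
def pvTargets : List String := ["!", ",", ".", ":", ";", "?", "n't", "'s", "'re", "'ve", "'ll", "'am", "'m"]

def pvScan : List Char → List Char
  | [] => []
  | c :: rest =>
    if c = ' ' ∧ (pvTargets.any fun t => PySem.Chars.startswith rest t.toList) then pvScan rest
    else c :: pvScan rest

def text_cleaning_alt (story : String) : String := String.ofList (pvScan story.toList)

-- ===== PRECONDITION & SPEC =====
def Spec_text_cleaning (story : String) (out : String) : Prop := out = text_cleaning_alt story
instance (story : String) (out : String) : Decidable (Spec_text_cleaning story out) := by unfold Spec_text_cleaning; infer_instance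

-- ===== CLAIM (what is proved, stated in full; the proofs are below) =====
def Claim_equal_text_cleaning : Prop := ∀ (story : String), Dom_text_cleaning story → Spec_text_cleaning story (text_cleaning story)

-- ===== LEMMAS AND PROOFS =====

-- Recursive form of Python's str.replace with a nonempty pattern (a :: old'), replacement new.
def repF (a : Char) (old' new : List Char) : List Char → List Char
  | [] => []
  | c :: t =>
    if (a :: old').isPrefixOf (c :: t) then new ++ repF a old' new (t.drop old'.length)
    else c :: repF a old' new t
termination_by l => l.length
decreasing_by
  · simp only [List.length_cons, List.length_drop]; omega
  · simp

lemma go_eq (a : Char) (old' new : List Char) :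
    ∀ fuel l acc, l.length ≤ fuel →
      PySem.Chars.replace.go (a :: old') new fuel l acc = acc.reverse ++ repF a old' new l := by
  intro fuel
  induction fuel with
  | zero =>
    intro l acc h
    have hl : l = [] := by cases l <;> simp_all
    subst hl
    simp [PySem.Chars.replace.go, repF]
  | succ n ih =>
    intro l acc h
    cases l with
    | nil => simp [PySem.Chars.replace.go, repF]
    | cons c t =>
      rw [PySem.Chars.replace.go]
      by_cases hp : (a :: old').isPrefixOf (c :: t)
      · rw [if_pos hp]
        have hlen : ((c :: t).drop (a :: old').length).length ≤ n := by
          simp only [List.length_drop, List.length_cons] at *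
          omega
        rw [ih _ _ hlen, repF, if_pos hp]
        simp only [List.length_cons, List.drop_succ_cons]
        simp
      · rw [if_neg hp, ih t (c :: acc) (by simpa using Nat.le_of_succ_le_succ (by simpa using h)),
          repF, if_neg hp]
        simp

lemma replace_eq (a : Char) (old' new l : List Char) :
    PySem.Chars.replace l (a :: old') new = repF a old' new l := by
  rw [PySem.Chars.replace]
  simp only [List.isEmpty_cons]
  exact (go_eq a old' new l.length l [] le_rfl).trans (by simp)

-- The 13 targets (as char lists, in A's order) and the proper-suffix closure set.
def TL : List (List Char) :=
  [['!'], [','], ['.'], [':'], [';'], ['?'],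
   ['n', '\'', 't'], ['\'', 's'], ['\'', 'r', 'e'], ['\'', 'v', 'e'],
   ['\'', 'l', 'l'], ['\'', 'a', 'm'], ['\'', 'm']]

def U : List (List Char) :=
  [['t'], ['s'], ['e'], ['l'], ['m'], ['r', 'e'], ['v', 'e'], ['l', 'l'], ['a', 'm'], ['\'', 't']]

-- One replace pass for target t (pattern ' '::t, replacement t).
def rT (t l : List Char) : List Char := repF ' ' t t l

def chainFrom (ts : List (List Char)) (l : List Char) : List Char :=
  ts.foldl (fun s t => rT t s) l

-- concrete finite facts about the target set (checked by Bool evaluation)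
lemma F_pairwise : ∀ t ∈ TL, ∀ t' ∈ TL, t ≠ t' → ¬ t <+: t' := by
  have h : (TL.all fun t => TL.all fun t' => t == t' || !(t.isPrefixOf t')) = true := rfl
  simp only [List.all_eq_true, Bool.or_eq_true, beq_iff_eq, Bool.not_eq_true'] at h
  intro t ht t' ht' hne hp
  rcases h t ht t' ht' with he | hf
  · exact hne he
  · rw [← List.isPrefixOf_iff_prefix] at hp
    simp [hf] at hp

lemma F_UT : ∀ u ∈ U, ∀ t ∈ TL, ¬ u <+: t ∧ ¬ t <+: u := by
  have h : (U.all fun u => TL.all fun t => !(u.isPrefixOf t) && !(t.isPrefixOf u)) = true := rfl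
  simp only [List.all_eq_true, Bool.and_eq_true, Bool.not_eq_true'] at h
  intro u hu t ht
  constructor <;> intro hp <;> rw [← List.isPrefixOf_iff_prefix] at hp
  · simp [(h u hu t ht).1] at hp
  · simp [(h u hu t ht).2] at hp

lemma F_tail : ∀ u ∈ U ++ TL, u.drop 1 = [] ∨ u.drop 1 ∈ U := by
  have h : ((U ++ TL).all fun u => (u.drop 1).isEmpty || U.contains (u.drop 1)) = true := rfl
  simp only [List.all_eq_true, Bool.or_eq_true, List.isEmpty_iff, List.contains_iff_mem] at h
  exact h

lemma F_ne_nil : ∀ u ∈ U ++ TL, u ≠ [] := by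
  have h : ((U ++ TL).all fun u => !u.isEmpty) = true := rfl
  simp only [List.all_eq_true, Bool.not_eq_true', List.isEmpty_eq_false_iff] at h
  exact h

lemma F_spacefree : ∀ t ∈ TL, ∀ c ∈ t, ¬ c = ' ' := by
  have h : (TL.all fun t => t.all fun c => !(c == ' ')) = true := rfl
  simp only [List.all_eq_true, Bool.not_eq_true', beq_eq_false_iff_ne, ne_eq] at h
  exact h

set_option maxRecDepth 2048 in
lemma F_nodup : TL.Nodup := by decide

lemma F_Udisj : ∀ u ∈ U, u ∉ TL := by
  have h : (U.all fun u => !(TL.contains u)) = true := rfl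
  simp only [List.all_eq_true, Bool.not_eq_true'] at h
  intro u hu hm
  have hc := List.contains_iff_mem.mpr hm
  rw [h u hu] at hc
  exact absurd hc (by decide)

-- a list that is a prefix of neither b nor has b as a prefix is no prefix of b ++ w
lemma NPgen {a b : List Char} (h1 : ¬ a <+: b) (h2 : ¬ b <+: a) (w : List Char) :
    ¬ a <+: b ++ w := by
  intro h
  rcases Nat.le_total a.length b.length with hl | hl
  · exact h1 (List.prefix_of_prefix_length_le h (List.prefix_append b w) hl)
  · exact h2 (List.prefix_of_prefix_length_le (List.prefix_append b w) h hl)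

lemma rT_nil (t : List Char) : rT t [] = [] := by simp [rT, repF]

lemma rT_neg {t : List Char} {c : Char} {x : List Char} (h : ¬ (' ' :: t) <+: (c :: x)) :
    rT t (c :: x) = c :: rT t x := by
  rw [rT, repF, if_neg (by simpa [List.isPrefixOf_iff_prefix] using h)]
  rfl

lemma rT_pos {t x : List Char} (h : t <+: x) :
    rT t (' ' :: x) = t ++ rT t (x.drop t.length) := by
  rw [rT, repF, if_pos (by simp [List.isPrefixOf_iff_prefix, h])]
  rfl

lemma rT_cons {t : List Char} {c : Char} {x : List Char} (hc : c ≠ ' ') :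
    rT t (c :: x) = c :: rT t x :=
  rT_neg (fun h => hc (List.cons_prefix_cons.mp h).1.symm)

lemma rT_app {t s : List Char} (hs : ∀ c ∈ s, c ≠ ' ') (x : List Char) :
    rT t (s ++ x) = s ++ rT t x := by
  induction s with
  | nil => simp
  | cons c s ih =>
    simp only [List.cons_append, rT_cons (hs c (by simp))]
    rw [ih (fun c hc => hs c (by simp [hc]))]

lemma chain_nil (ts : List (List Char)) : chainFrom ts [] = [] := by
  induction ts with
  | nil => rfl
  | cons t ts ih => simp [chainFrom, List.foldl_cons, rT_nil] at ih ⊢; exact ih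

lemma chain_cons {c : Char} (hc : c ≠ ' ') (ts : List (List Char)) (x : List Char) :
    chainFrom ts (c :: x) = c :: chainFrom ts x := by
  induction ts generalizing x with
  | nil => rfl
  | cons t ts ih => simp only [chainFrom, List.foldl_cons, rT_cons hc]; exact ih _

lemma chain_app {s : List Char} (hs : ∀ c ∈ s, c ≠ ' ') (ts : List (List Char)) (x : List Char) :
    chainFrom ts (s ++ x) = s ++ chainFrom ts x := by
  induction ts generalizing x with
  | nil => rfl
  | cons t ts ih => simp only [chainFrom, List.foldl_cons, rT_app hs]; exact ih _

-- suffix lemma: a pass for t cannot create a fresh front occurrence of any other u ∈ U ∪ TL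
lemma SL : ∀ n y, y.length ≤ n → ∀ t ∈ TL, ∀ u, (u ∈ U ∨ u ∈ TL) → u ≠ t →
    u <+: rT t y → u <+: y := by
  intro n
  induction n with
  | zero =>
    intro y hy t _ u hu _ hpre
    have : y = [] := by cases y <;> simp_all
    subst this
    rw [rT_nil] at hpre
    exact absurd (List.prefix_nil.mp hpre) (F_ne_nil u (List.mem_append.mpr hu))
  | succ n ih =>
    intro y hy t ht u hu hut hpre
    cases y with
    | nil =>
      rw [rT_nil] at hpre
      exact absurd (List.prefix_nil.mp hpre) (F_ne_nil u (List.mem_append.mpr hu))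
    | cons c y' =>
      by_cases hm : (' ' :: t) <+: (c :: y')
      · obtain ⟨hc, hty⟩ := List.cons_prefix_cons.mp hm
        subst hc
        rw [rT_pos hty] at hpre
        have hnp : ¬ u <+: t ∧ ¬ t <+: u := by
          rcases hu with hu | hu
          · exact F_UT u hu t ht
          · exact ⟨F_pairwise u hu t ht hut, F_pairwise t ht u hu (Ne.symm hut)⟩
        exact absurd hpre (NPgen hnp.1 hnp.2 _)
      · rw [rT_neg hm] at hpre
        cases u with
        | nil => exact absurd rfl (F_ne_nil [] (List.mem_append.mpr hu))
        | cons u0 u' =>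
          obtain ⟨rfl, hu'⟩ := List.cons_prefix_cons.mp hpre
          rcases F_tail _ (List.mem_append.mpr hu) with htl | htl
          · simp only [List.drop_one, List.tail_cons] at htl
            subst htl
            exact List.cons_prefix_cons.mpr ⟨rfl, List.nil_prefix⟩
          · simp only [List.drop_one, List.tail_cons] at htl
            have : u' <+: y' := by
              refine ih y' (by simpa using Nat.le_of_succ_le_succ hy) t ht u' (Or.inl htl) ?_ hu'
              intro h; subst h; exact F_Udisj u' htl ht
            exact List.cons_prefix_cons.mpr ⟨rfl, this⟩

-- the invariant carried through the remaining passes when the head space matched nothing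
def InvG (ts : List (List Char)) (y : List Char) : Prop :=
  (∀ t ∈ ts, ¬ t <+: y) ∨ (∃ t₀, t₀ ∈ TL ∧ (∀ t ∈ ts, t ≠ t₀) ∧ ∃ z, y = t₀ ++ z)

lemma KEY : ∀ ts, (∀ t ∈ ts, t ∈ TL) → ts.Nodup → ∀ y, InvG ts y →
    chainFrom ts (' ' :: y) = ' ' :: chainFrom ts y := by
  intro ts
  induction ts with
  | nil => intro _ _ y _; rfl
  | cons t ts ih =>
    intro hsub hnd y hinv
    have htTL : t ∈ TL := hsub t (by simp)
    rcases hinv with hleft | ⟨t₀, ht₀, hne, z, rfl⟩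
    · have hnt : ¬ t <+: y := hleft t (by simp)
      have step : rT t (' ' :: y) = ' ' :: rT t y :=
        rT_neg (by simp only [List.cons_prefix_cons]; rintro ⟨-, h⟩; exact hnt h)
      have hinv' : InvG ts (rT t y) := by
        by_cases hc : t <+: rT t y
        · obtain ⟨z, hz⟩ := hc
          exact Or.inr ⟨t, htTL, fun t' ht' h => (List.nodup_cons.mp hnd).1 (h ▸ ht'), z, hz.symm⟩
        · refine Or.inl fun t' ht' h => ?_
          have hne' : t' ≠ t := fun h' => (List.nodup_cons.mp hnd).1 (h' ▸ ht')
          exact hleft t' (by simp [ht']) (SL y.length y le_rfl t htTL t' (Or.inr (hsub t' (by simp [ht']))) hne' h)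
      simp only [chainFrom, List.foldl_cons, step]
      rw [show ∀ l, List.foldl (fun s t => rT t s) l ts = chainFrom ts l from fun _ => rfl,
        show ∀ l, List.foldl (fun s t => rT t s) l ts = chainFrom ts l from fun _ => rfl]
      exact ih (fun t' ht' => hsub t' (by simp [ht'])) (List.nodup_cons.mp hnd).2 _ hinv'
    · have htne : t ≠ t₀ := hne t (by simp)
      have hnt : ¬ t <+: t₀ ++ z :=
        NPgen (F_pairwise t htTL t₀ ht₀ htne) (F_pairwise t₀ ht₀ t htTL (Ne.symm htne)) z
      have step : rT t (' ' :: (t₀ ++ z)) = ' ' :: rT t (t₀ ++ z) :=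
        rT_neg (by simp only [List.cons_prefix_cons]; rintro ⟨-, h⟩; exact hnt h)
      have happ : rT t (t₀ ++ z) = t₀ ++ rT t z := rT_app (F_spacefree t₀ ht₀) z
      have hinv' : InvG ts (rT t (t₀ ++ z)) :=
        Or.inr ⟨t₀, ht₀, fun t' ht' => hne t' (by simp [ht']), rT t z, happ⟩
      simp only [chainFrom, List.foldl_cons, step]
      rw [show ∀ l, List.foldl (fun s t => rT t s) l ts = chainFrom ts l from fun _ => rfl,
        show ∀ l, List.foldl (fun s t => rT t s) l ts = chainFrom ts l from fun _ => rfl]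
      exact ih (fun t' ht' => hsub t' (by simp [ht'])) (List.nodup_cons.mp hnd).2 _ hinv'

-- passes before the matching one leave " " ++ tm ++ · alone
lemma SA {tm : List Char} (htm : tm ∈ TL) : ∀ ts, (∀ t ∈ ts, t ∈ TL ∧ t ≠ tm) →
    ∀ y, chainFrom ts (' ' :: (tm ++ y)) = ' ' :: (tm ++ chainFrom ts y) := by
  intro ts
  induction ts with
  | nil => intro _ y; rfl
  | cons t ts ih =>
    intro hsub y
    obtain ⟨htTL, htne⟩ := hsub t (by simp)
    have hnt : ¬ t <+: tm ++ y :=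
      NPgen (F_pairwise t htTL tm htm htne) (F_pairwise tm htm t htTL (Ne.symm htne)) y
    have step : rT t (' ' :: (tm ++ y)) = ' ' :: (tm ++ rT t y) := by
      rw [rT_neg (by simp only [List.cons_prefix_cons]; rintro ⟨-, h⟩; exact hnt h),
        rT_app (F_spacefree tm htm)]
    simp only [chainFrom, List.foldl_cons, step]
    exact ih (fun t' ht' => hsub t' (by simp [ht'])) _

-- the scan-side analogues
lemma scan_cons_keep {c : Char} {x : List Char}
    (h : ¬ (c = ' ' ∧ (pvTargets.any fun t => PySem.Chars.startswith x t.toList))) :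
    pvScan (c :: x) = c :: pvScan x := by
  rw [pvScan, if_neg h]

lemma scan_app {s : List Char} (hs : ∀ c ∈ s, c ≠ ' ') (x : List Char) :
    pvScan (s ++ x) = s ++ pvScan x := by
  induction s with
  | nil => simp
  | cons c s ih =>
    simp only [List.cons_append]
    rw [scan_cons_keep (by rintro ⟨h, -⟩; exact hs c (by simp) h), ih (fun c hc => hs c (by simp [hc]))]

lemma any_iff (rest : List Char) :
    (pvTargets.any fun t => PySem.Chars.startswith rest t.toList) = true ↔ ∃ t ∈ TL, t <+: rest := by
  show (TL.any fun t => t.isPrefixOf rest) = true ↔ _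
  simp [List.any_eq_true, List.isPrefixOf_iff_prefix]

lemma MAIN : ∀ n l, l.length ≤ n → chainFrom TL l = pvScan l := by
  intro n
  induction n with
  | zero =>
    intro l hl
    have : l = [] := by cases l <;> simp_all
    subst this
    simp [chain_nil, pvScan]
  | succ n ih =>
    intro l hl
    cases l with
    | nil => simp [chain_nil, pvScan]
    | cons c x =>
      by_cases hc : c = ' '
      · subst hc
        by_cases hm : ∃ t ∈ TL, t <+: x
        · obtain ⟨t, htTL, hpre⟩ := hm
          obtain ⟨x', rfl⟩ := hpre
          obtain ⟨pre, post, hTL⟩ := List.append_of_mem htTL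
          have hnd : (pre ++ t :: post).Nodup := hTL ▸ F_nodup
          have hpre_mem : ∀ t' ∈ pre, t' ∈ TL ∧ t' ≠ t := by
            intro t' ht'
            refine ⟨by rw [hTL]; exact List.mem_append.mpr (Or.inl ht'), fun h => ?_⟩
            subst h
            exact (List.nodup_append.mp hnd).2.2 t' ht' t' (by simp) rfl
          have hlen : x'.length ≤ n := by
            have htl := List.length_pos_of_ne_nil (F_ne_nil t (List.mem_append.mpr (Or.inr htTL)))
            simp only [List.length_cons, List.length_append] at hl
            omega
          have htsp := F_spacefree t htTL
          calc chainFrom TL (' ' :: (t ++ x'))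
              = chainFrom (t :: post) (chainFrom pre (' ' :: (t ++ x'))) := by
                rw [hTL]; simp [chainFrom, List.foldl_append]
            _ = chainFrom post (rT t (' ' :: (t ++ chainFrom pre x'))) := by
                rw [SA htTL pre hpre_mem]; rfl
            _ = chainFrom post (t ++ rT t (chainFrom pre x')) := by
                rw [rT_pos (List.prefix_append t _), List.drop_left]
            _ = t ++ chainFrom post (rT t (chainFrom pre x')) := chain_app htsp _ _
            _ = t ++ chainFrom TL x' := by
                rw [hTL]; simp [chainFrom, List.foldl_append]
            _ = t ++ pvScan x' := by rw [ih x' hlen]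
            _ = pvScan (' ' :: (t ++ x')) := by
                rw [pvScan, if_pos ⟨rfl, (any_iff _).mpr ⟨t, htTL, List.prefix_append t x'⟩⟩,
                  scan_app htsp]
        · have hm' : ∀ t ∈ TL, ¬ t <+: x := by simpa using hm
          have hkey := KEY TL (fun _ h => h) F_nodup x (Or.inl hm')
          rw [hkey, pvScan, if_neg (by
            rintro ⟨-, h⟩
            obtain ⟨t, htTL, hpre⟩ := (any_iff x).mp h
            exact hm' t htTL hpre), ih x (by simpa using Nat.le_of_succ_le_succ hl)]
      · rw [chain_cons hc, scan_cons_keep (by rintro ⟨h, -⟩; exact hc h),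
          ih x (by simpa using Nat.le_of_succ_le_succ hl)]

lemma A_toList (story : String) :
    (text_cleaning story).toList = chainFrom TL story.toList := by
  simp only [text_cleaning, PySem.Str.toList_replace]
  rw [show ("!,.:;?".toList) = ['!', ',', '.', ':', ';', '?'] from rfl]
  simp only [List.foldl_cons, List.foldl_nil, PySem.Str.toList_replace, String.toList_ofList]
  rw [show (" n't" : String).toList = ' ' :: ['n', '\'', 't'] from rfl,
    show ("n't" : String).toList = ['n', '\'', 't'] from rfl,
    show (" 's" : String).toList = ' ' :: ['\'', 's'] from rfl,
    show ("'s" : String).toList = ['\'', 's'] from rfl,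
    show (" 're" : String).toList = ' ' :: ['\'', 'r', 'e'] from rfl,
    show ("'re" : String).toList = ['\'', 'r', 'e'] from rfl,
    show (" 've" : String).toList = ' ' :: ['\'', 'v', 'e'] from rfl,
    show ("'ve" : String).toList = ['\'', 'v', 'e'] from rfl,
    show (" 'll" : String).toList = ' ' :: ['\'', 'l', 'l'] from rfl,
    show ("'ll" : String).toList = ['\'', 'l', 'l'] from rfl,
    show (" 'am" : String).toList = ' ' :: ['\'', 'a', 'm'] from rfl,
    show ("'am" : String).toList = ['\'', 'a', 'm'] from rfl,
    show (" 'm" : String).toList = ' ' :: ['\'', 'm'] from rfl,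
    show ("'m" : String).toList = ['\'', 'm'] from rfl]
  simp only [replace_eq]
  rfl

-- ===== VERDICT (by name: the statement is the Claim_ definition above) =====
theorem text_cleaning_spec : Claim_equal_text_cleaning := by
  intro story _
  unfold Spec_text_cleaning
  have h : (text_cleaning story).toList = (text_cleaning_alt story).toList := by
    rw [A_toList, MAIN story.toList.length story.toList le_rfl]
    simp [text_cleaning_alt]
  have := congrArg String.ofList h
  rwa [String.ofList_toList, String.ofList_toList] at this
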